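-- pv_equiv track=rewrite | github.com/25mcmi02-uoh-ai/ML-lab-25mcmi02 | nlp/try.py | find_count_pair
-- ===== SOURCE A (Python) =====
-- def find_count_pair(corpus, v1, v2):
--     counter = 0
--     s = 1
--     l = len(corpus)
--
--     while True:
--         try:
--             found = corpus.index(v1, s)
--         except ValueError:
--             break
--         if found+1 != l and corpus[found+1] == v2:
--             counter += 1
--         s = found+1
--     return counter
-- ===== SOURCE B (Python) =====
-- def find_count_pair(corpus, v1, v2):
--     # Build a frequency table of all adjacent pairs starting at index 1,
--     # then answer with a single lookup.
--     freq = {}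
--     for pair in zip(corpus[1:], corpus[2:]):
--         freq[pair] = freq.get(pair, 0) + 1
--     return freq.get((v1, v2), 0)
-- ===== Notes on version B (the rewrite author's own statement) =====
-- stated objective: simpler
-- what changed: Replaces the repeated corpus.index/try-except scanning loop with a frequency dictionary built in one pass over zip(corpus[1:], corpus[2:]) followed by a single lookup.
import Mathlib
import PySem

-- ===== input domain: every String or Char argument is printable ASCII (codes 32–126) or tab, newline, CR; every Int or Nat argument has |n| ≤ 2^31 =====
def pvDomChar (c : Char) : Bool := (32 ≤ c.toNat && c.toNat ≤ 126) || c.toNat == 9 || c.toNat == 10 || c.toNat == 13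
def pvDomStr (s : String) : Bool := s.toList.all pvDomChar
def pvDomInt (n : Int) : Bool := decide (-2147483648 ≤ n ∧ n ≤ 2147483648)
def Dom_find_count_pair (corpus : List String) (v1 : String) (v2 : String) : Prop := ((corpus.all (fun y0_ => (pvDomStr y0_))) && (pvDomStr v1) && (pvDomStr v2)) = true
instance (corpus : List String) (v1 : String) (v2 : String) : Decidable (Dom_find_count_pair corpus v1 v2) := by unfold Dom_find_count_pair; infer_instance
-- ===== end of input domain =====

-- B replaces A's repeated corpus.index/try-except scan with a pair-frequency
-- dictionary built in one pass and a single lookup (objective: simpler).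

-- ===== PORT A =====
-- corpus.index(v1, s) for a Nat start s: first index ≥ s holding v1; none = ValueError (exact for 0 ≤ s).
def idxFromA (corpus : List String) (v1 : String) (s : Nat) : Option Nat :=
  (PySem.List.index? (corpus.drop s) v1).map (· + s)

theorem idxFromA_lt {corpus : List String} {v1 : String} {s found : Nat}
    (h : idxFromA corpus v1 s = some found) : s ≤ found ∧ found < corpus.length := by
  unfold idxFromA at h
  obtain ⟨j, hj, hjs⟩ := Option.map_eq_some_iff.mp h
  obtain ⟨hk, _, _⟩ := PySem.List.getElem_of_index?_eq_some hj
  simp only [List.length_drop] at hk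
  omega

-- the 'while True' loop of A, state (counter, s)
def findLoopA (corpus : List String) (v1 v2 : String) (counter : Int) (s : Nat) : Int :=
  match h : idxFromA corpus v1 s with
  | none => counter
  | some found =>
      -- corpus[found+1]? = some v2 is Python's corpus[found+1] == v2: the first
      -- conjunct guarantees found+1 is in range, so getElem? is exact here.
      findLoopA corpus v1 v2
        (if found + 1 ≠ corpus.length ∧ corpus[found + 1]? = some v2 then counter + 1 else counter)
        (found + 1)
  termination_by corpus.length - s
  decreasing_by have := idxFromA_lt h; omega

def find_count_pair (corpus : List String) (v1 : String) (v2 : String) : Int :=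
  findLoopA corpus v1 v2 0 1

-- ===== PORT B =====
def find_count_pair_alt (corpus : List String) (v1 : String) (v2 : String) : Int :=
  -- freq = dict built over zip(corpus[1:], corpus[2:]); answer = freq.get((v1, v2), 0)
  (((PySem.List.slice corpus (some 1) none).zip (PySem.List.slice corpus (some 2) none)).foldl
      (fun d p => d.insert p (d.getD p 0 + 1)) PySem.Dict.empty).getD (v1, v2) 0

-- ===== PRECONDITION & SPEC =====
def Spec_find_count_pair (corpus : List String) (v1 : String) (v2 : String) (out : Int) : Prop := out = find_count_pair_alt corpus v1 v2
instance (corpus : List String) (v1 : String) (v2 : String) (out : Int) : Decidable (Spec_find_count_pair corpus v1 v2 out) := by unfold Spec_find_count_pair; infer_instance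

-- ===== CLAIM (what is proved, stated in full; the proofs are below) =====
def Claim_equal_find_count_pair : Prop := ∀ (corpus : List String) (v1 : String) (v2 : String), Dom_find_count_pair corpus v1 v2 → Spec_find_count_pair corpus v1 v2 (find_count_pair corpus v1 v2)

-- ===== LEMMAS AND PROOFS =====

-- number of adjacent (v1, v2) pairs in a list
def pairCount (v1 v2 : String) : List String → Int
  | [] => 0
  | [_] => 0
  | a :: b :: t => (if a = v1 ∧ b = v2 then 1 else 0) + pairCount v1 v2 (b :: t)

theorem pairCount_of_not_mem {v1 : String} (v2 : String) :
    ∀ {l : List String}, v1 ∉ l → pairCount v1 v2 l = 0 := by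
  intro l
  induction l with
  | nil => intro _; rfl
  | cons a t ih =>
    intro h
    cases t with
    | nil => rfl
    | cons b t' =>
      have ha : a ≠ v1 := fun he => h (by simp [he])
      have : pairCount v1 v2 (b :: t') = 0 := ih (fun hm => h (List.mem_cons_of_mem _ hm))
      simp [pairCount, this, ha]

theorem pairCount_append_of_not_mem {v1 : String} (v2 : String) :
    ∀ {pre w : List String}, v1 ∉ pre → pairCount v1 v2 (pre ++ w) = pairCount v1 v2 w := by
  intro pre
  induction pre with
  | nil => intro w _; rfl
  | cons a pre' ih =>
    intro w h
    have ha : a ≠ v1 := fun he => h (by simp [he])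
    have h' : v1 ∉ pre' := fun hm => h (List.mem_cons_of_mem _ hm)
    cases hpw : pre' ++ w with
    | nil =>
      have hw : w = [] := (List.append_eq_nil_iff.mp hpw).2
      have hp : pre' = [] := (List.append_eq_nil_iff.mp hpw).1
      subst hw; subst hp
      rfl
    | cons b t =>
      calc pairCount v1 v2 (a :: pre' ++ w)
          = (if a = v1 ∧ b = v2 then 1 else 0) + pairCount v1 v2 (b :: t) := by
            simp only [List.cons_append, hpw, pairCount]
        _ = pairCount v1 v2 (pre' ++ w) := by
            rw [if_neg (fun hc => ha hc.1), ← hpw]; ring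
        _ = pairCount v1 v2 w := ih h'

theorem pairCount_cons_cons (v1 v2 a b : String) (t : List String) :
    pairCount v1 v2 (a :: b :: t) = (if a = v1 ∧ b = v2 then 1 else 0) + pairCount v1 v2 (b :: t) := rfl

theorem count_zip_tail (v1 v2 : String) :
    ∀ l : List String, ((l.zip l.tail).count (v1, v2) : Int) = pairCount v1 v2 l := by
  intro l
  induction l with
  | nil => rfl
  | cons a t ih =>
    cases t with
    | nil => rfl
    | cons b t' =>
      simp only [List.tail_cons] at ih ⊢
      have : (a :: b :: t').zip (b :: t') = (a, b) :: ((b :: t').zip t') := rfl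
      rw [this, List.count_cons]
      have hiff : ((a, b) = (v1, v2)) ↔ (a = v1 ∧ b = v2) := by
        constructor
        · intro h; exact ⟨congrArg Prod.fst h, congrArg Prod.snd h⟩
        · intro ⟨h1, h2⟩; rw [h1, h2]
      by_cases hc : a = v1 ∧ b = v2
      · rw [if_pos (by simp [hiff.mpr hc])]
        push_cast
        rw [ih, pairCount_cons_cons, if_pos hc]
        ring
      · rw [if_neg (by simpa [beq_iff_eq, hiff] using hc)]
        push_cast
        rw [ih, pairCount_cons_cons, if_neg hc]
        ring

theorem findLoopA_eq (corpus : List String) (v1 v2 : String) (counter : Int) (s : Nat) :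
    findLoopA corpus v1 v2 counter s = counter + pairCount v1 v2 (corpus.drop s) := by
  induction counter, s using findLoopA.induct corpus v1 v2 with
  | case1 counter s h =>
    rw [findLoopA, h]
    -- no v1 at index ≥ s
    unfold idxFromA at h
    have hj : PySem.List.index? (corpus.drop s) v1 = none := Option.map_eq_none_iff.mp h
    have hnm : v1 ∉ corpus.drop s := (PySem.List.index?_eq_none_iff _ _).mp hj
    rw [pairCount_of_not_mem v2 hnm]; ring
  | case2 counter s found h ih =>
    rw [findLoopA, h]
    dsimp only
    simp only [dite_eq_ite] at ih
    unfold idxFromA at h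
    obtain ⟨j, hj, hjs⟩ := Option.map_eq_some_iff.mp h
    · obtain ⟨pre, suf, hsplit, hlen, hnm⟩ := (PySem.List.index?_eq_some_iff _ _ _).mp hj
      have hfound : found = j + s := hjs.symm
      have hds : (corpus.drop s).length = corpus.length - s := List.length_drop
      have hlens : (corpus.drop s).length = pre.length + (suf.length + 1) := by
        rw [hsplit, List.length_append, List.length_cons]
      have hslt : s ≤ corpus.length := by omega
      -- suffix identification
      have hdrop1 : corpus.drop (found + 1) = suf := by
        have he : corpus.drop (found + 1) = ((corpus.drop s).drop (j + 1)) := by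
          rw [List.drop_drop]; congr 1; omega
        rw [he, hsplit, show j + 1 = pre.length + 1 from by omega, ← List.drop_drop,
          List.drop_left, List.drop_one, List.tail_cons]
      -- total length
      have hlentot : corpus.length = found + 1 + suf.length := by omega
      -- loop condition vs suffix shape
      have hpc : pairCount v1 v2 (corpus.drop s) =
          (if found + 1 ≠ corpus.length ∧ corpus[found + 1]? = some v2 then 1 else 0)
            + pairCount v1 v2 suf := by
        have hskip : pairCount v1 v2 (corpus.drop s) = pairCount v1 v2 (v1 :: suf) := by
          rw [hsplit]
          exact pairCount_append_of_not_mem v2 hnm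
        rw [hskip]
        have hget : corpus[found + 1]? = suf.head? := by
          rw [← List.head?_drop, hdrop1]
        cases suf with
        | nil =>
          have : ¬ (found + 1 ≠ corpus.length ∧ corpus[found + 1]? = some v2) := by
            intro ⟨hne, _⟩
            exact hne (by simp only [List.length_nil] at hlentot; omega)
          simp [pairCount, this]
        | cons b t =>
          have hne : found + 1 ≠ corpus.length := by
            simp only [List.length_cons] at hlentot; omega
          have hhd : corpus[found + 1]? = some b := by rw [hget]; rfl
          by_cases hb : b = v2
          · have : found + 1 ≠ corpus.length ∧ corpus[found + 1]? = some v2 := ⟨hne, by rw [hhd, hb]⟩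
            simp [pairCount, this, hb]
          · have : ¬ (found + 1 ≠ corpus.length ∧ corpus[found + 1]? = some v2) := by
              intro ⟨_, hc⟩
              rw [hhd] at hc
              exact hb (Option.some.injEq _ _ ▸ hc)
            simp [pairCount, this, hb]
      rw [ih, hdrop1, hpc]
      split <;> ring

theorem alt_eq (corpus : List String) (v1 v2 : String) :
    find_count_pair_alt corpus v1 v2 = pairCount v1 v2 corpus.tail := by
  unfold find_count_pair_alt
  rw [PySem.List.slice_from_one, PySem.List.slice_from corpus (by norm_num : (0:Int) ≤ 2)]
  have h2 : corpus.drop (2 : Int).toNat = corpus.tail.tail := by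
    rw [show ((2:Int).toNat) = 1 + 1 from rfl, ← List.drop_drop, List.drop_one, List.drop_one]
  rw [h2]
  rw [PySem.Dict.getD_foldl_insert_add_one]
  rw [show (PySem.Dict.empty : PySem.Dict (String × String) Int).getD (v1, v2) 0 = 0 from rfl]
  rw [zero_add]
  exact count_zip_tail v1 v2 corpus.tail

-- ===== VERDICT (by name: the statement is the Claim_ definition above) =====
theorem find_count_pair_spec : Claim_equal_find_count_pair := by
  intro corpus v1 v2 _
  unfold Spec_find_count_pair find_count_pair
  rw [findLoopA_eq, alt_eq, zero_add, List.drop_one]
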